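-- pv_equiv track=rewrite | github.com/saint2706/Pro-g-rammingChallenges4 | challenges/Algorithmic/PassGen/passgen_visualizer.py | category_breakdown
-- ===== SOURCE A (Python) =====
-- import string
-- from typing import Dict, Iterable, Mapping, Optional
--
-- def category_breakdown(frequencies: Mapping[str, int]) -> Dict[str, int]:
--     """Aggregate frequencies into letter/digit/symbol buckets."""
--
--     letters = set(string.ascii_letters)
--     digits = set(string.digits)
--     symbols_total = 0
--     letters_total = 0
--     digits_total = 0
--
--     for char, count in frequencies.items():
--         if char in letters:
--             letters_total += count
--         elif char in digits:
--             digits_total += count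
--         else:
--             symbols_total += count
--
--     return {
--         "letters": letters_total,
--         "digits": digits_total,
--         "symbols": symbols_total,
--     }
-- ===== SOURCE B (Python) =====
-- import string
--
--
-- def category_breakdown(frequencies):
--     """Aggregate frequencies into letter/digit/symbol buckets.
--
--     Different decomposition: compute the grand total once, sum the letter and
--     digit buckets as filtered sums, and derive symbols by subtraction instead
--     of ever classifying a symbol.
--     """
--     letters = set(string.ascii_letters)
--     digits = set(string.digits)
--     items = list(frequencies.items())
--     total = sum(count for _, count in items)
--     letters_total = sum(count for char, count in items if char in letters)
--     digits_total = sum(count for char, count in items if char in digits)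
--     return {
--         "letters": letters_total,
--         "digits": digits_total,
--         "symbols": total - letters_total - digits_total,
--     }
-- ===== Notes on version B (the rewrite author's own statement) =====
-- stated objective: alternative
-- what changed: Instead of a single loop classifying every key into one of three buckets with if/elif/else, B computes the grand total and two filtered sums (letters, digits) and derives symbols by subtraction, never classifying a symbol.
import Mathlib
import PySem

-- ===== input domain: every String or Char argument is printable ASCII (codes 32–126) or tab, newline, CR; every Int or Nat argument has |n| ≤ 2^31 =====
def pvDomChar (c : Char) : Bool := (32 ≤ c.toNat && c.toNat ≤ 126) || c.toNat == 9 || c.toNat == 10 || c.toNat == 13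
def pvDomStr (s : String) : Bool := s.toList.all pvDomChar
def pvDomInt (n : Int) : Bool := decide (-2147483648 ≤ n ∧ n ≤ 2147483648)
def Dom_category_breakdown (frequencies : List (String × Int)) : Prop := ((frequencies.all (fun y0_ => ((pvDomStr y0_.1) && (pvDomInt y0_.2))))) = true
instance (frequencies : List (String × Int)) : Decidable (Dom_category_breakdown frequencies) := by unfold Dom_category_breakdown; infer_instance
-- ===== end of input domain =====

-- B replaces A's three-way if/elif/else classifying loop by a grand total plus two
-- filtered sums, deriving the symbols bucket by subtraction (objective: alternative).


-- ===== PORT A =====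
-- `char in set(string.ascii_letters)`: true iff the key is a single ASCII letter
-- (Char.isAlpha tests exactly 'A'-'Z'/'a'-'z'); exact for every string key.
def memLetters (s : String) : Bool :=
  match s.toList with
  | [c] => c.isAlpha
  | _ => false

-- `char in set(string.digits)`: true iff the key is a single ASCII digit; exact.
def memDigits (s : String) : Bool :=
  match s.toList with
  | [c] => c.isDigit
  | _ => false

-- the body of A's for-loop: state = (letters_total, digits_total, symbols_total)
def bucketStep (st : Int × Int × Int) (p : String × Int) : Int × Int × Int :=
  if memLetters p.1 then (st.1 + p.2, st.2.1, st.2.2)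
  else if memDigits p.1 then (st.1, st.2.1 + p.2, st.2.2)
  else (st.1, st.2.1, st.2.2 + p.2)

def category_breakdown (frequencies : List (String × Int)) : List (String × Int) :=
  let st := frequencies.foldl bucketStep (0, 0, 0)
  [("letters", st.1), ("digits", st.2.1), ("symbols", st.2.2)]

-- ===== PORT B =====
-- sum(count for …): Python's sum is a left fold from 0
def sumCounts (fs : List (String × Int)) : Int :=
  fs.foldl (fun acc p => acc + p.2) 0

def category_breakdown_alt (frequencies : List (String × Int)) : List (String × Int) :=
  let total := sumCounts frequencies
  let lettersTotal := sumCounts (frequencies.filter (fun p => memLetters p.1))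
  let digitsTotal := sumCounts (frequencies.filter (fun p => memDigits p.1))
  [("letters", lettersTotal), ("digits", digitsTotal),
   ("symbols", total - lettersTotal - digitsTotal)]

-- ===== PRECONDITION & SPEC =====
def Spec_category_breakdown (frequencies : List (String × Int)) (out : List (String × Int)) : Prop := out = category_breakdown_alt frequencies
instance (frequencies : List (String × Int)) (out : List (String × Int)) : Decidable (Spec_category_breakdown frequencies out) := by unfold Spec_category_breakdown; infer_instance

-- ===== CLAIM (what is proved, stated in full; the proofs are below) =====
def Claim_equal_category_breakdown : Prop := ∀ (frequencies : List (String × Int)), Dom_category_breakdown frequencies → Spec_category_breakdown frequencies (category_breakdown frequencies)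

-- ===== LEMMAS AND PROOFS =====
-- a single-character string is never both a letter and a digit
lemma memLetters_not_memDigits (s : String) (h : memLetters s = true) :
    memDigits s = false := by
  unfold memLetters at h
  unfold memDigits
  -- rw closes the nil and two-or-more cases by rfl (those sides are literally false)
  rcases hs : s.toList with _ | ⟨c, _ | ⟨d, t⟩⟩ <;> rw [hs] at h
  show c.isDigit = false
  have h' : c.isAlpha = true := h
  simp [Char.isAlpha, Char.isUpper, Char.isLower, Char.isDigit,
    UInt32.le_iff_toNat_le] at h' ⊢
  omega

-- shifting the starting accumulator of the sum fold
lemma foldl_sum_shift (fs : List (String × Int)) (a : Int) :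
    fs.foldl (fun acc p => acc + p.2) a = a + sumCounts fs := by
  induction fs generalizing a with
  | nil => simp [sumCounts]
  | cons p t ih =>
    simp only [List.foldl_cons, sumCounts, Int.zero_add]
    rw [ih, ih p.2]
    ring

lemma sumCounts_cons (p : String × Int) (fs : List (String × Int)) :
    sumCounts (p :: fs) = p.2 + sumCounts fs := by
  simp only [sumCounts, List.foldl_cons, Int.zero_add]
  exact foldl_sum_shift fs p.2

-- A's fold computes exactly B's three sums
lemma bucket_fold (fs : List (String × Int)) (l d s : Int) :
    fs.foldl bucketStep (l, d, s) =
      (l + sumCounts (fs.filter (fun p => memLetters p.1)),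
       d + sumCounts (fs.filter (fun p => memDigits p.1)),
       s + (sumCounts fs - sumCounts (fs.filter (fun p => memLetters p.1))
              - sumCounts (fs.filter (fun p => memDigits p.1)))) := by
  induction fs generalizing l d s with
  | nil => simp [sumCounts]
  | cons p t ih =>
    simp only [List.foldl_cons, bucketStep]
    by_cases hl : memLetters p.1 = true
    · have hd := memLetters_not_memDigits p.1 hl
      simp only [hl, if_true, ih, List.filter_cons, hd, sumCounts_cons]
      refine Prod.ext ?_ (Prod.ext ?_ ?_) <;> (simp; try ring)
    · simp only [Bool.not_eq_true] at hl
      by_cases hd : memDigits p.1 = true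
      · simp only [hl, hd, if_false, if_true, ih, List.filter_cons, sumCounts_cons,
          Bool.false_eq_true]
        refine Prod.ext ?_ (Prod.ext ?_ ?_) <;> (simp; try ring)
      · simp only [Bool.not_eq_true] at hd
        simp only [hl, hd, if_false, ih, List.filter_cons, sumCounts_cons,
          Bool.false_eq_true]
        refine Prod.ext ?_ (Prod.ext ?_ ?_) <;> (simp; try ring)

-- ===== VERDICT (by name: the statement is the Claim_ definition above) =====
theorem category_breakdown_spec : Claim_equal_category_breakdown := by
  intro fs _
  show category_breakdown fs = category_breakdown_alt fs
  simp only [category_breakdown, category_breakdown_alt, bucket_fold]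
  simp
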